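-- pv_equiv track=rewrite | github.com/Muskan156/LEDGER_AI | backend/services/pdf_service.py | merge_wrap_rows
-- ===== SOURCE A (Python) =====
-- def merge_wrap_rows(rows, n_cols):
--     if not rows:
--         return rows
--     merged = []
--     for row in rows:
--         row = list(row) + [''] * max(0, n_cols - len(row))
--         col0_empty = not row[0].strip()
--         rest_empty = all(not row[i].strip() for i in range(2, len(row)))
--         if col0_empty and rest_empty and merged:
--             extra = row[1].strip()
--             if extra and len(merged[-1]) > 1:
--                 merged[-1][1] = (merged[-1][1] + ' ' + extra).strip()
--         else:
--             merged.append(row)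
--     return merged
-- ===== SOURCE B (Python) =====
-- def merge_wrap_rows(rows, n_cols):
--     if not rows:
--         return rows
--
--     def pad(r):
--         return list(r) + [''] * max(0, n_cols - len(r))
--
--     def is_cont(r):
--         return not r[0].strip() and all(not c.strip() for c in r[2:])
--
--     # Pass 1: group each head row with the continuation rows that follow it.
--     groups = []
--     for r in map(pad, rows):
--         if is_cont(r) and groups:
--             groups[-1].append(r)
--         else:
--             groups.append([r])
--
--     # Pass 2: fold each group's continuations into its head row.
--     out = []
--     for head, *conts in groups:
--         for c in conts:
--             extra = c[1].strip()
--             if extra and len(head) > 1: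
--                 head[1] = (head[1] + ' ' + extra).strip()
--         out.append(head)
--     return out
-- ===== Notes on version B (the rewrite author's own statement) =====
-- stated objective: alternative
-- what changed: A fuses detection and merging in one loop that mutates the last emitted row; B decomposes it into two passes: first group each head row with its trailing continuation rows, then fold every group's continuations into its head.
import Mathlib
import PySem

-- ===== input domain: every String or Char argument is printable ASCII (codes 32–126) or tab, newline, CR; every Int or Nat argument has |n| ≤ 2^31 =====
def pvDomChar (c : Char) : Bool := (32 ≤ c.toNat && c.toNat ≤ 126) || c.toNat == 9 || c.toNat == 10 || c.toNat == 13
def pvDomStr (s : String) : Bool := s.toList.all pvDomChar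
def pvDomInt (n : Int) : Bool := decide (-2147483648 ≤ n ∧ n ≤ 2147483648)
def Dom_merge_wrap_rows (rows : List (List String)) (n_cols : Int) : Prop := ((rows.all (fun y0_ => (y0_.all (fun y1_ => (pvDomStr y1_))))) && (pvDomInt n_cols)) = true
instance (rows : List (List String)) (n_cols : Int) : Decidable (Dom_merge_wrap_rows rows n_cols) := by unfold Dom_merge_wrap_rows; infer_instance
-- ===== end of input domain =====

-- B rewrites A's single fused loop as a two-pass decomposition (group continuation rows
-- under their head row, then fold each group into its head); objective: alternative
-- decomposition, same asymptotic cost; return value only (neither mutates its input).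


-- ===== PORT A =====
-- one loop iteration of A: pad the row, merge it into merged[-1] or append it
def pvStepA (n_cols : Int) (merged : List (List String)) (row0 : List String) : List (List String) :=
  let row := row0 ++ List.replicate (Int.toNat (max 0 (n_cols - (row0.length : Int)))) ""
  let col0_empty := PySem.Str.strip (PySem.List.pyGetD row 0 "") == ""
  let rest_empty := (PySem.List.pyRange 2 ((row.length : Int)) 1).all
      (fun i => PySem.Str.strip (PySem.List.pyGetD row i "") == "")
  if col0_empty && rest_empty && !merged.isEmpty then
    let extra := PySem.Str.strip (PySem.List.pyGetD row 1 "")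
    let last := PySem.List.pyGetD merged (-1) []
    if extra != "" && decide (1 < last.length) then
      merged.dropLast ++
        [PySem.List.pySetD last 1
          (PySem.Str.strip (PySem.List.pyGetD last 1 "" ++ " " ++ extra))]
    else merged
  else merged ++ [row]

def merge_wrap_rows (rows : List (List String)) (n_cols : Int) : List (List String) :=
  if rows.isEmpty then rows
  else rows.foldl (pvStepA n_cols) []

-- ===== PORT B =====
def pvPadB (n_cols : Int) (r : List String) : List String :=
  r ++ List.replicate (Int.toNat (max 0 (n_cols - (r.length : Int)))) ""

def pvIsCont (r : List String) : Bool :=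
  (PySem.Str.strip (PySem.List.pyGetD r 0 "") == "") &&
  (PySem.List.slice r (some 2) none).all (fun c => PySem.Str.strip c == "")

-- pass 1: group each head row with the continuation rows that follow it
def pvGStep (n_cols : Int) (groups : List (List (List String))) (r0 : List String) :
    List (List (List String)) :=
  let r := pvPadB n_cols r0
  if pvIsCont r && !groups.isEmpty then
    groups.dropLast ++ [PySem.List.pyGetD groups (-1) [] ++ [r]]
  else groups ++ [[r]]

def pvAbsorb (head : List String) (c : List String) : List String :=
  let extra := PySem.Str.strip (PySem.List.pyGetD c 1 "")
  if extra != "" && decide (1 < head.length) then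
    PySem.List.pySetD head 1
      (PySem.Str.strip (PySem.List.pyGetD head 1 "" ++ " " ++ extra))
  else head

-- pass 2: fold a group's continuations into its head row
def pvReduce (g : List (List String)) : List String :=
  match g with
  | [] => []
  | h :: cs => cs.foldl pvAbsorb h

def merge_wrap_rows_alt (rows : List (List String)) (n_cols : Int) : List (List String) :=
  if rows.isEmpty then rows
  else ((rows.foldl (pvGStep n_cols) []).map pvReduce)

-- ===== PRECONDITION & SPEC =====
-- length of a row after A pads it to n_cols columns
def pvPadLen (n_cols : Int) (r : List String) : Int := max ((r.length : Int)) n_cols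

-- Pre_ excludes exactly the inputs on which A raises IndexError: a row whose padded
-- length is 0 (row[0] fails), or a non-first row of padded length 1 whose only cell is
-- blank (it is taken as a continuation and row[1] fails).
def Pre_merge_wrap_rows (rows : List (List String)) (n_cols : Int) : Prop :=
  ∀ p ∈ rows.zipIdx,
    1 ≤ pvPadLen n_cols p.1 ∧
    (pvPadLen n_cols p.1 = 1 → 1 ≤ p.2 → ¬ PySem.Str.strip (p.1.headD "") = "")
instance (rows : List (List String)) (n_cols : Int) : Decidable (Pre_merge_wrap_rows rows n_cols) := by unfold Pre_merge_wrap_rows; infer_instance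

def pvWitness_merge_wrap_rows : List (List String) × Int :=
  ([["h", "v"], ["", "more"], ["x", "y"]], 2)

def Spec_merge_wrap_rows (rows : List (List String)) (n_cols : Int) (out : List (List String)) : Prop := out = merge_wrap_rows_alt rows n_cols
instance (rows : List (List String)) (n_cols : Int) (out : List (List String)) : Decidable (Spec_merge_wrap_rows rows n_cols out) := by unfold Spec_merge_wrap_rows; infer_instance

-- ===== CLAIM (what is proved, stated in full; the proofs are below) =====
def Claim_equal_merge_wrap_rows : Prop := ∀ (rows : List (List String)) (n_cols : Int), Dom_merge_wrap_rows rows n_cols → Pre_merge_wrap_rows rows n_cols → Spec_merge_wrap_rows rows n_cols (merge_wrap_rows rows n_cols)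

-- ===== LEMMAS AND PROOFS =====

-- A's inline continuation test equals B's pvIsCont (range-over-indices vs slice)
theorem pvCont_eq (row : List String) :
    ((PySem.Str.strip (PySem.List.pyGetD row 0 "") == "") &&
      (PySem.List.pyRange 2 ((row.length : Int)) 1).all
        (fun i => PySem.Str.strip (PySem.List.pyGetD row i "") == ""))
    = pvIsCont row := by
  unfold pvIsCont
  congr 1
  have hmap : (PySem.List.pyRange 2 ((row.length : Int)) 1).map
      (fun i => PySem.List.pyGetD row i "") = row.drop 2 := by
    simpa using PySem.List.map_pyGetD_pyRange' (xs := row) (a := 2) (d := "") (by omega)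
  have hsl : PySem.List.slice row (some 2) none = row.drop 2 := by simp [pysem]
  rw [hsl, ← hmap, List.all_map]
  rfl

-- reducing a group extended by one continuation = absorbing it into the reduced head
theorem pvReduce_append (g : List (List String)) (hg : g ≠ []) (r : List String) :
    pvReduce (g ++ [r]) = pvAbsorb (pvReduce g) r := by
  cases g with
  | nil => exact absurd rfl hg
  | cons h cs => simp [pvReduce, List.foldl_append]

-- in the merge branch, A's step is: replace the last merged row by its absorption
theorem pvStepA_merge (merged : List (List String)) (hm : merged ≠ [])
    (row : List String) :
    (let extra := PySem.Str.strip (PySem.List.pyGetD row 1 "")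
     let last := PySem.List.pyGetD merged (-1) []
     if extra != "" && decide (1 < last.length) then
       merged.dropLast ++
         [PySem.List.pySetD last 1
           (PySem.Str.strip (PySem.List.pyGetD last 1 "" ++ " " ++ extra))]
     else merged)
    = merged.dropLast ++ [pvAbsorb (merged.getLast hm) row] := by
  rw [PySem.List.pyGetD_neg_one (h := hm)]
  simp only [pvAbsorb]
  by_cases hx : (PySem.Str.strip (PySem.List.pyGetD row 1 "") != "" &&
      decide (1 < (merged.getLast hm).length)) = true
  · rw [if_pos hx, if_pos hx]
  · rw [if_neg hx, if_neg hx]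
    exact (List.dropLast_concat_getLast hm).symm

-- one A-step on the reduced groups = reduce of one B-grouping-step
theorem pvStep_eq (n_cols : Int) (groups : List (List (List String)))
    (hne : ∀ g ∈ groups, g ≠ []) (r0 : List String) :
    pvStepA n_cols (groups.map pvReduce) r0 = (pvGStep n_cols groups r0).map pvReduce := by
  unfold pvStepA pvGStep
  simp only [pvPadB]
  set row := r0 ++ List.replicate (Int.toNat (max 0 (n_cols - (r0.length : Int)))) "" with hrow
  rw [show ((PySem.Str.strip (PySem.List.pyGetD row 0 "") == "") &&
        (PySem.List.pyRange 2 ((row.length : Int)) 1).all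
          (fun i => PySem.Str.strip (PySem.List.pyGetD row i "") == "") &&
        !(groups.map pvReduce).isEmpty)
      = (pvIsCont row && !groups.isEmpty) by
    rw [pvCont_eq row, List.isEmpty_map]]
  by_cases hc : (pvIsCont row && !groups.isEmpty) = true
  · rw [if_pos hc, if_pos hc]
    have hg : groups ≠ [] := by
      simp only [Bool.and_eq_true] at hc
      simpa using hc.2
    have hmne : groups.map pvReduce ≠ [] := by simpa using hg
    rw [pvStepA_merge (groups.map pvReduce) hmne row]
    rw [List.getLast_map (f := pvReduce) hmne]
    rw [List.map_append]
    rw [← List.map_dropLast]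
    congr 1
    simp only [List.map_cons, List.map_nil]
    rw [PySem.List.pyGetD_neg_one (h := hg)]
    rw [pvReduce_append (groups.getLast hg) (hne _ (List.getLast_mem hg)) row]
  · rw [if_neg hc, if_neg hc]
    simp [pvReduce]

-- the grouping invariant: every group is nonempty
theorem pvGStep_ne (n_cols : Int) (groups : List (List (List String)))
    (hne : ∀ g ∈ groups, g ≠ []) (r0 : List String) :
    ∀ g ∈ pvGStep n_cols groups r0, g ≠ [] := by
  intro g hg
  simp only [pvGStep] at hg
  split at hg
  · rcases List.mem_append.mp hg with h | h
    · exact hne g (List.mem_of_mem_dropLast h)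
    · simp only [List.mem_singleton] at h
      subst h; simp
  · rcases List.mem_append.mp hg with h | h
    · exact hne g h
    · simp only [List.mem_singleton] at h
      subst h; simp

-- main loop correspondence: A's fold over the reduced groups tracks B's grouping fold
theorem pvMain (n_cols : Int) (rest : List (List String)) :
    ∀ (groups : List (List (List String))), (∀ g ∈ groups, g ≠ []) →
      rest.foldl (pvStepA n_cols) (groups.map pvReduce)
        = (rest.foldl (pvGStep n_cols) groups).map pvReduce := by
  induction rest with
  | nil => intro groups _; rfl
  | cons r rest ih =>
    intro groups hne
    simp only [List.foldl_cons]
    rw [pvStep_eq n_cols groups hne r]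
    exact ih (pvGStep n_cols groups r) (pvGStep_ne n_cols groups hne r)

-- ===== VERDICT (by name: the statement is the Claim_ definition above) =====
theorem merge_wrap_rows_spec : Claim_equal_merge_wrap_rows := by
  intro rows n_cols _ _
  unfold Spec_merge_wrap_rows merge_wrap_rows merge_wrap_rows_alt
  by_cases h : rows.isEmpty
  · rw [if_pos h, if_pos h]
  · rw [if_neg h, if_neg h]
    simpa using pvMain n_cols rows [] (by simp)
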